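-- pv_equiv track=rewrite | github.com/JustinReiter/LynxEagleBot | gameLog.py | convertFileToDict
-- ===== SOURCE A (Python) =====
-- def convertFileToDict(linesIt):
--     newDict = {}
--     key = ""
--     hasSeenKey = False
--     for line in linesIt:
--         if hasSeenKey:
--             newDict[key] = line.strip("\n")
--         else:
--             key = line.strip("\n")
--         hasSeenKey = not hasSeenKey
--     return newDict
-- ===== SOURCE B (Python) =====
-- def convertFileToDict(linesIt):
--     lines = [line.strip("\n") for line in linesIt]
--     return {lines[2 * i]: lines[2 * i + 1] for i in range(len(lines) // 2)}
-- ===== Notes on version B (the rewrite author's own statement) =====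
-- stated objective: idiomatic
-- what changed: Replaces A's single-pass boolean-toggle state machine with two staged passes: first strip every line, then build the dict by direct index arithmetic (pairs lines[2*i], lines[2*i+1] for i in range(len//2)), so no per-line flag or carried key exists.
import Mathlib
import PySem

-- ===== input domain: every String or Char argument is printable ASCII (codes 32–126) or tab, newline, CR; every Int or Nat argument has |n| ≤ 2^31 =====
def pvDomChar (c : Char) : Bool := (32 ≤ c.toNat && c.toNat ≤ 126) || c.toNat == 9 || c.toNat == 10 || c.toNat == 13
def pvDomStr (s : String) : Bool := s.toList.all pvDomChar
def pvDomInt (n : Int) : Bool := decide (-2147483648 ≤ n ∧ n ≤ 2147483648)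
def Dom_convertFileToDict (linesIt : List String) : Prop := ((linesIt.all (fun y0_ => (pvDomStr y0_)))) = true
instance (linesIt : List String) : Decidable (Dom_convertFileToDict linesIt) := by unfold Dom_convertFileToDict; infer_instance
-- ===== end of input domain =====

-- B replaces A's per-line boolean-toggle state machine with two staged passes: strip all lines first, then pair by index arithmetic lines[2i]/lines[2i+1] over range(len//2) (idiomatic; same cost).


-- ===== PORT A =====
-- fold state: (newDict, key, hasSeenKey), exactly A's loop
def convertFileToDict (linesIt : List String) : List (String × String) :=
  (linesIt.foldl
    (fun st line =>
      let st' :=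
        if st.2.2 then (st.1.insert st.2.1 (PySem.Str.stripChars line "\n"), st.2.1, st.2.2)
        else (st.1, PySem.Str.stripChars line "\n", st.2.2)
      (st'.1, st'.2.1, ! st'.2.2))
    ((PySem.Dict.empty : PySem.Dict String String), "", false)).1.items

-- ===== PORT B =====
-- staged pass 1: strip every line; pass 2: dict comprehension over range(len//2) pairing
-- lines[2*i] / lines[2*i+1]. Python's lines[2*i] never raises here (2*i+1 < len), so the
-- indexing is ported with pyGetD (default never reached).
def convertFileToDict_alt (linesIt : List String) : List (String × String) :=
  let lines := linesIt.map (fun line => PySem.Str.stripChars line "\n")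
  ((PySem.List.pyRange 0 (PySem.Int.floordiv (lines.length : Int) 2)).foldl
    (fun d i => d.insert (PySem.List.pyGetD lines (2 * i) "") (PySem.List.pyGetD lines (2 * i + 1) ""))
    (PySem.Dict.empty : PySem.Dict String String)).items

-- ===== PRECONDITION & SPEC =====
def Spec_convertFileToDict (linesIt : List String) (out : List (String × String)) : Prop := out = convertFileToDict_alt linesIt
instance (linesIt : List String) (out : List (String × String)) : Decidable (Spec_convertFileToDict linesIt out) := by unfold Spec_convertFileToDict; infer_instance

-- ===== CLAIM (what is proved, stated in full; the proofs are below) =====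
def Claim_equal_convertFileToDict : Prop := ∀ (linesIt : List String), Dom_convertFileToDict linesIt → Spec_convertFileToDict linesIt (convertFileToDict linesIt)

-- ===== LEMMAS AND PROOFS =====
-- the list of consecutive pairs (dangling last element dropped): the common description of both programs
def pvPairs : List String → List (String × String)
  | [] => []
  | [_] => []
  | k :: v :: rest => (k, v) :: pvPairs rest

-- A's toggle loop folds exactly the consecutive pairs into the dict (strip applied per component)
theorem pvFoldA_eq (lines : List String) :
    ∀ (d : PySem.Dict String String) (key : String),
    (lines.foldl
      (fun st line =>
        let st' :=
          if st.2.2 then (st.1.insert st.2.1 (PySem.Str.stripChars line "\n"), st.2.1, st.2.2)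
          else (st.1, PySem.Str.stripChars line "\n", st.2.2)
        (st'.1, st'.2.1, ! st'.2.2))
      (d, key, false)).1
    = (pvPairs lines).foldl
        (fun d kv => d.insert (PySem.Str.stripChars kv.1 "\n") (PySem.Str.stripChars kv.2 "\n")) d := by
  induction lines using pvPairs.induct with
  | case1 => intro d key; simp [pvPairs]
  | case2 k => intro d key; simp [pvPairs, List.foldl]
  | case3 k v rest ih =>
      intro d key
      simp only [pvPairs, List.foldl]
      exact ih _ _

-- B's indexed pairing over range (len / 2) produces exactly the consecutive pairs
theorem pvIndexPairs_eq (lines : List String) :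
    (List.range (lines.length / 2)).map
      (fun (i : Nat) => (PySem.List.pyGetD lines (2 * (i : Int)) "", PySem.List.pyGetD lines (2 * (i : Int) + 1) ""))
    = pvPairs lines := by
  induction lines using pvPairs.induct with
  | case1 => simp [pvPairs]
  | case2 k => simp [pvPairs]
  | case3 k v rest ih =>
      have hlen : (k :: v :: rest).length / 2 = rest.length / 2 + 1 := by
        simp [List.length_cons]; omega
      rw [hlen, List.range_succ_eq_map, List.map_cons, List.map_map, pvPairs]
      congr 1
      · have e0 : (2 * ((0 : Nat) : Int)) = ((0 : Nat) : Int) := by norm_num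
        have e1 : (((0 : Nat) : Int) + 1) = ((1 : Nat) : Int) := by norm_num
        rw [e0, e1, PySem.List.pyGetD_natCast, PySem.List.pyGetD_natCast]
        simp [List.getD]
      · rw [← ih]
        apply List.map_congr_left
        intro i _
        have h1 : (2 * ((Nat.succ i : Nat) : Int)) = ((2 * i + 2 : Nat) : Int) := by push_cast; ring
        have h2 : (((2 * i + 2 : Nat) : Int) + 1) = ((2 * i + 3 : Nat) : Int) := by push_cast; ring
        have h3 : (2 * ((i : Nat) : Int)) = ((2 * i : Nat) : Int) := by push_cast; ring
        have h4 : (((2 * i : Nat) : Int) + 1) = ((2 * i + 1 : Nat) : Int) := by push_cast; ring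
        simp only [Function.comp]
        rw [h1, h3, h2, h4, PySem.List.pyGetD_natCast, PySem.List.pyGetD_natCast,
          PySem.List.pyGetD_natCast, PySem.List.pyGetD_natCast]
        simp [List.getD]

-- pvPairs commutes with mapping a function over the lines
theorem pvPairs_map (f : String -> String) (lines : List String) :
    pvPairs (lines.map f) = (pvPairs lines).map (fun kv => (f kv.1, f kv.2)) := by
  induction lines using pvPairs.induct with
  | case1 => simp [pvPairs]
  | case2 k => simp [pvPairs]
  | case3 k v rest ih => simp [pvPairs, ih]

-- B's range fold equals the plain pair fold
theorem pvFoldB_eq (lines : List String) :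
    (List.range (lines.length / 2)).foldl
      (fun (d : PySem.Dict String String) (i : Nat) =>
        d.insert (PySem.List.pyGetD lines (2 * (i : Int)) "") (PySem.List.pyGetD lines (2 * (i : Int) + 1) ""))
      PySem.Dict.empty
    = (pvPairs lines).foldl (fun d kv => d.insert kv.1 kv.2) PySem.Dict.empty := by
  rw [← pvIndexPairs_eq, List.foldl_map]

-- A's strip-inside fold equals the plain pair fold over pre-stripped lines
theorem pvFoldStrip_eq (l : List String) :
    (pvPairs l).foldl
      (fun (d : PySem.Dict String String) kv =>
        d.insert (PySem.Str.stripChars kv.1 "\n") (PySem.Str.stripChars kv.2 "\n"))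
      PySem.Dict.empty
    = (pvPairs (l.map (fun line => PySem.Str.stripChars line "\n"))).foldl
        (fun d kv => d.insert kv.1 kv.2) PySem.Dict.empty := by
  rw [pvPairs_map, List.foldl_map]

-- ===== VERDICT (by name: the statement is the Claim_ definition above) =====
theorem convertFileToDict_spec : Claim_equal_convertFileToDict := by
  intro linesIt _
  show convertFileToDict linesIt = convertFileToDict_alt linesIt
  unfold convertFileToDict convertFileToDict_alt
  dsimp only
  rw [pvFoldA_eq, pvFoldStrip_eq]
  have hfd : PySem.Int.floordiv (((linesIt.map (fun line => PySem.Str.stripChars line "\n")).length : Nat) : Int) 2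
      = (((linesIt.map (fun line => PySem.Str.stripChars line "\n")).length / 2 : Nat) : Int) := by
    exact_mod_cast PySem.Int.floordiv_natCast _ 2
  rw [hfd, PySem.List.pyRange_zero_natCast, List.foldl_map, pvFoldB_eq]
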